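-- pv_equiv track=rewrite | github.com/doctorlatex/VRCMT | stub_src/stub_main.py | _filter_exp_allow
-- ===== SOURCE A (Python) =====
-- def _filter_exp_allow(argv: list[str]) -> list[str]:
--     out: list[str] = []
--     i = 0
--     n = len(argv)
--     while i < n:
--         a = argv[i]
--         if a == "--exp-allow":
--             i += 1
--             if i < n and not argv[i].startswith("-"):
--                 i += 1
--             continue
--         if a.startswith("--exp-allow="):
--             i += 1
--             continue
--         out.append(a)
--         i += 1
--     return out
-- ===== SOURCE B (Python) =====
-- def _filter_exp_allow(argv: list[str]) -> list[str]:
--     out: list[str] = []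
--     expect_value = False
--     for a in argv:
--         if expect_value:
--             expect_value = False
--             if not a.startswith("-"):
--                 continue
--         if a == "--exp-allow":
--             expect_value = True
--             continue
--         if a.startswith("--exp-allow="):
--             continue
--         out.append(a)
--     return out
-- ===== Notes on version B (the rewrite author's own statement) =====
-- stated objective: idiomatic
-- what changed: Replaces the index-with-lookahead while-loop by a single for-loop over the elements carrying a boolean 'expect_value' state flag.
import Mathlib
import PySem

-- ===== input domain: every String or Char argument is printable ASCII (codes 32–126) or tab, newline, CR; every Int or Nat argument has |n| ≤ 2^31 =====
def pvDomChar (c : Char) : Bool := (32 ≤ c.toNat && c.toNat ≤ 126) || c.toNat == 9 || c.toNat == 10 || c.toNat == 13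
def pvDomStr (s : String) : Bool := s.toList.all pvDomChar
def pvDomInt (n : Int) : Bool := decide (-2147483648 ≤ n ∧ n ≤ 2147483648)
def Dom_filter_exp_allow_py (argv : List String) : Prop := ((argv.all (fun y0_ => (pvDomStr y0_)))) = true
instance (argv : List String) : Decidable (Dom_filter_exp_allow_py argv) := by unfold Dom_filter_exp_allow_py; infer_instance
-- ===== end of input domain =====

-- B rewrites A's index-with-lookahead while-loop as a single for-loop carrying a boolean state flag (idiomatic; same output).

-- ===== PORT A =====
-- A walks by index i; the suffix argv[i:] is the recursion argument. On "--exp-allow" it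
-- looks ahead: if the next token exists and does not start with "-", both are skipped,
-- otherwise only the flag is skipped and the next token is re-processed.
def filter_exp_allow_py_go (out : List String) : List String → List String
  | [] => out
  | a :: rest =>
    if a = "--exp-allow" then
      match rest with
      | [] => out
      | b :: rest' =>
        if PySem.Str.startswith b "-" then filter_exp_allow_py_go out (b :: rest')
        else filter_exp_allow_py_go out rest'
    else if PySem.Str.startswith a "--exp-allow=" then filter_exp_allow_py_go out rest
    else filter_exp_allow_py_go (out ++ [a]) rest

def filter_exp_allow_py (argv : List String) : List String :=
  filter_exp_allow_py_go [] argv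

-- ===== PORT B =====
-- B's for-loop body: state is (out, expect_value).
def filter_exp_allow_py_alt_step (s : List String × Bool) (a : String) : List String × Bool :=
  if s.2 && !(PySem.Str.startswith a "-") then (s.1, false)
  else if a = "--exp-allow" then (s.1, true)
  else if PySem.Str.startswith a "--exp-allow=" then (s.1, false)
  else (s.1 ++ [a], false)

def filter_exp_allow_py_alt (argv : List String) : List String :=
  (argv.foldl filter_exp_allow_py_alt_step ([], false)).1

-- ===== PRECONDITION & SPEC =====
def Spec_filter_exp_allow_py (argv : List String) (out : List String) : Prop := out = filter_exp_allow_py_alt argv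
instance (argv : List String) (out : List String) : Decidable (Spec_filter_exp_allow_py argv out) := by unfold Spec_filter_exp_allow_py; infer_instance

-- ===== CLAIM (what is proved, stated in full; the proofs are below) =====
def Claim_equal_filter_exp_allow_py : Prop := ∀ (argv : List String), Dom_filter_exp_allow_py argv → Spec_filter_exp_allow_py argv (filter_exp_allow_py argv)

-- ===== LEMMAS AND PROOFS =====

theorem filter_exp_allow_key : ∀ (l : List String) (out : List String),
    (List.foldl filter_exp_allow_py_alt_step (out, false) l).1 = filter_exp_allow_py_go out l ∧
    (List.foldl filter_exp_allow_py_alt_step (out, true) l).1 =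
      (match l with
       | [] => out
       | b :: rest' =>
         if PySem.Str.startswith b "-" then filter_exp_allow_py_go out (b :: rest')
         else filter_exp_allow_py_go out rest')
  | [], out => by simp [filter_exp_allow_py_go]
  | a :: rest, out => by
    have ih := filter_exp_allow_key rest
    have ih' : ∀ out', (List.foldl filter_exp_allow_py_alt_step (out', false) rest).1
        = filter_exp_allow_py_go out' rest := fun out' => (ih out').1
    constructor
    · rw [List.foldl_cons, filter_exp_allow_py_go.eq_def]
      by_cases hflag : a = "--exp-allow"
      · subst hflag
        simp only [filter_exp_allow_py_alt_step, Bool.false_and, Bool.false_eq_true, reduceIte]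
        exact (ih out).2
      · by_cases hpre : PySem.Str.startswith a "--exp-allow=" = true
        · simp only [filter_exp_allow_py_alt_step, hflag, hpre, Bool.false_and,
            Bool.false_eq_true, reduceIte]
          exact ih' out
        · simp only [filter_exp_allow_py_alt_step, hflag, hpre, Bool.false_and,
            Bool.false_eq_true, reduceIte]
          exact ih' (out ++ [a])
    · rw [List.foldl_cons]
      show _ = if PySem.Str.startswith a "-" = true then filter_exp_allow_py_go out (a :: rest)
        else filter_exp_allow_py_go out rest
      by_cases hdash : PySem.Str.startswith a "-" = true
      · rw [if_pos hdash, filter_exp_allow_py_go.eq_def]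
        by_cases hflag : a = "--exp-allow"
        · subst hflag
          simp only [filter_exp_allow_py_alt_step, hdash, Bool.not_true, Bool.true_and,
            Bool.false_eq_true, reduceIte]
          exact (ih out).2
        · by_cases hpre : PySem.Str.startswith a "--exp-allow=" = true
          · simp only [filter_exp_allow_py_alt_step, hdash, hflag, hpre, Bool.not_true,
              Bool.true_and, Bool.false_eq_true, reduceIte]
            exact ih' out
          · simp only [filter_exp_allow_py_alt_step, hdash, hflag, hpre, Bool.not_true,
              Bool.true_and, Bool.false_eq_true, reduceIte]
            exact ih' (out ++ [a])
      · rw [if_neg hdash]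
        have hdash' : PySem.Str.startswith a "-" = false := by
          cases h : PySem.Str.startswith a "-" with
          | true => exact absurd h hdash
          | false => rfl
        simp only [filter_exp_allow_py_alt_step, hdash', Bool.not_false, Bool.true_and,
          reduceIte]
        exact ih' out

-- ===== VERDICT (by name: the statement is the Claim_ definition above) =====
theorem filter_exp_allow_py_spec : Claim_equal_filter_exp_allow_py := by
  intro argv _
  unfold Spec_filter_exp_allow_py filter_exp_allow_py filter_exp_allow_py_alt
  exact ((filter_exp_allow_key argv []).1).symm
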